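-- pv_equiv track=rewrite | github.com/oceanypt/CFd | CFd.multiAmazon.py | get_data_per_class
-- ===== SOURCE A (Python) =====
-- def get_data_per_class(train_set):
-- 	set_per_class = {'0': [], '1': [], '2':[]}
-- 	for d in train_set:
-- 		if d[0] == 0:
-- 			set_per_class['0'].append(d)
-- 		elif d[0] == 1:
-- 			set_per_class['1'].append(d)
-- 		else:
-- 			set_per_class['2'].append(d)
-- 	return set_per_class
-- ===== SOURCE B (Python) =====
-- def get_data_per_class(train_set):
--     key = lambda d: 0 if d[0] == 0 else (1 if d[0] == 1 else 2)
--     s = sorted(train_set, key=key)  # stable: order within each class preserved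
--     c0 = sum(1 for d in train_set if d[0] == 0)
--     c1 = sum(1 for d in train_set if d[0] == 1)
--     return {'0': s[:c0], '1': s[c0:c0 + c1], '2': s[c0 + c1:]}
-- ===== Notes on version B (the rewrite author's own statement) =====
-- stated objective: alternative
-- what changed: Replaces the single-pass if/elif/else bucket-append loop by a sort-then-slice algorithm: stable-sort by a 0/1/2 class key, count the first two bucket sizes, and cut the sorted list into the three buckets by slicing.
import Mathlib
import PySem

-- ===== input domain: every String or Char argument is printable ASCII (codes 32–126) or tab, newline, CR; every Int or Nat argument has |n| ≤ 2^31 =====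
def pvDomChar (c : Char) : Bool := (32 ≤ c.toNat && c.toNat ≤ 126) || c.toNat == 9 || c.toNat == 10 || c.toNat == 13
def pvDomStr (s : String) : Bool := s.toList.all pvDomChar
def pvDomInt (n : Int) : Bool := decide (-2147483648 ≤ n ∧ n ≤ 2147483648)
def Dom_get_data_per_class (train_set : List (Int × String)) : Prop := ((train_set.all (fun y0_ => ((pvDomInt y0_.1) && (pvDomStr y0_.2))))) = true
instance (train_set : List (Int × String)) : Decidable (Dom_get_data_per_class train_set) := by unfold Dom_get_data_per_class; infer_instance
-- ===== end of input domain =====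

-- B replaces A's single-pass if/elif/else bucket-append loop by sort-then-slice: a stable
-- sort on a 0/1/2 class key, two counts, and three slices of the sorted list (alternative).


-- ===== PORT A =====
-- A: one pass over train_set, appending each item to the matching bucket of the dict.
def get_data_per_class (train_set : List (Int × String)) : List (String × List (Int × String)) :=
  (train_set.foldl
    (fun set_per_class d =>
      if d.1 == 0 then set_per_class.modify "0" [] (· ++ [d])
      else if d.1 == 1 then set_per_class.modify "1" [] (· ++ [d])
      else set_per_class.modify "2" [] (· ++ [d]))
    (PySem.Dict.ofList [("0", []), ("1", []), ("2", [])])).items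

-- ===== PORT B =====
-- B: stable sort by the 0/1/2 class key, count the first two classes, slice the buckets out.
def pvClassKey (d : Int × String) : Int :=
  if d.1 == 0 then 0 else if d.1 == 1 then 1 else 2

def get_data_per_class_alt (train_set : List (Int × String)) : List (String × List (Int × String)) :=
  let s := PySem.List.sorted train_set pvClassKey false
  let c0 : Int := (train_set.countP (fun d => d.1 == 0) : Nat)
  let c1 : Int := (train_set.countP (fun d => d.1 == 1) : Nat)
  [("0", PySem.List.slice s none (some c0)),
   ("1", PySem.List.slice s (some c0) (some (c0 + c1))),
   ("2", PySem.List.slice s (some (c0 + c1)) none)]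

-- ===== PRECONDITION & SPEC =====
def Spec_get_data_per_class (train_set : List (Int × String)) (out : List (String × List (Int × String))) : Prop := out = get_data_per_class_alt train_set
instance (train_set : List (Int × String)) (out : List (String × List (Int × String))) : Decidable (Spec_get_data_per_class train_set out) := by unfold Spec_get_data_per_class; infer_instance

-- ===== CLAIM (what is proved, stated in full; the proofs are below) =====
def Claim_equal_get_data_per_class : Prop := ∀ (train_set : List (Int × String)), Dom_get_data_per_class train_set → Spec_get_data_per_class train_set (get_data_per_class train_set)

-- ===== LEMMAS AND PROOFS =====
-- insertBy inserts x right at the boundary: after all of `as` (predicate false there),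
-- before the head of `bs` (predicate true there, if any).
theorem insertBy_cons_eq {α : Type} (before : α → α → Bool) (x y : α) (ys : List α) :
    PySem.List.insertBy before x (y :: ys) =
    if before x y then x :: y :: ys else y :: PySem.List.insertBy before x ys := rfl

theorem insertBy_split {α : Type} (before : α → α → Bool) (x : α) (as bs : List α)
    (ha : ∀ y ∈ as, before x y = false)
    (hb : ∀ b t, bs = b :: t → before x b = true) :
    PySem.List.insertBy before x (as ++ bs) = as ++ x :: bs := by
  induction as with
  | nil =>
    cases bs with
    | nil => simp [PySem.List.insertBy]
    | cons b t => simp [insertBy_cons_eq, hb b t rfl]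
  | cons a as ih =>
    have hfa : before x a = false := ha a (by simp)
    rw [List.cons_append, insertBy_cons_eq, hfa]
    simp [ih (fun y hy => ha y (by simp [hy]))]

-- the stable insertion sort on the 0/1/2 key is exactly the three filters concatenated
theorem foldl_insert_filters (l : List (Int × String)) :
    ∀ (a b c : List (Int × String)),
    (∀ y ∈ a, pvClassKey y = 0) → (∀ y ∈ b, pvClassKey y = 1) → (∀ y ∈ c, pvClassKey y = 2) →
    (l.foldl (fun acc x => PySem.List.insertBy (fun p q => decide (pvClassKey p < pvClassKey q)) x acc)
      (a ++ b ++ c)) =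
    (a ++ l.filter (fun d => pvClassKey d == 0)) ++
    (b ++ l.filter (fun d => pvClassKey d == 1)) ++
    (c ++ l.filter (fun d => pvClassKey d == 2)) := by
  induction l with
  | nil => intro a b c _ _ _; simp
  | cons x t ih =>
    intro a b c hA hB hC
    have hx : pvClassKey x = 0 ∨ pvClassKey x = 1 ∨ pvClassKey x = 2 := by
      unfold pvClassKey; split_ifs <;> simp
    simp only [List.foldl_cons]
    rcases hx with h0 | h1 | h2
    · have hins := insertBy_split (fun p q => decide (pvClassKey p < pvClassKey q)) x (a) (b ++ c)
        (by intro y hy; simp [h0, hA y hy])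
        (by intro e tl he
            have : e ∈ b ++ c := by rw [he]; simp
            rcases List.mem_append.mp this with h | h
            · simp [h0, hB e h]
            · simp [h0, hC e h])
      have hih := ih (a ++ [x]) b c
        (by intro y hy; rcases List.mem_append.mp hy with h | h
            · exact hA y h
            · have : y = x := by simpa using h
              rw [this]; exact h0) hB hC
      simp only [List.append_assoc, List.cons_append, List.nil_append] at hins hih ⊢
      rw [hins, hih]
      simp [h0]
    · have hins := insertBy_split (fun p q => decide (pvClassKey p < pvClassKey q)) x (a ++ b) c
        (by intro y hy
            rcases List.mem_append.mp hy with h | h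
            · simp [h1, hA y h]
            · simp [h1, hB y h])
        (by intro e tl he
            have : e ∈ c := by rw [he]; simp
            simp [h1, hC e this])
      have hih := ih a (b ++ [x]) c hA
        (by intro y hy; rcases List.mem_append.mp hy with h | h
            · exact hB y h
            · have : y = x := by simpa using h
              rw [this]; exact h1) hC
      simp only [List.append_assoc, List.cons_append, List.nil_append] at hins hih ⊢
      rw [hins, hih]
      simp [h1]
    · have hins := insertBy_split (fun p q => decide (pvClassKey p < pvClassKey q)) x (a ++ b ++ c) []
        (by intro y hy
            rcases List.mem_append.mp hy with h | h
            · rcases List.mem_append.mp h with h' | h'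
              · simp [h2, hA y h']
              · simp [h2, hB y h']
            · simp [h2, hC y h])
        (by intro e tl he; cases he)
      have hih := ih a b (c ++ [x]) hA hB
        (by intro y hy; rcases List.mem_append.mp hy with h | h
            · exact hC y h
            · have : y = x := by simpa using h
              rw [this]; exact h2)
      simp only [List.append_assoc, List.append_nil, List.cons_append, List.nil_append] at hins hih ⊢
      rw [hins, hih]
      simp [h2]

theorem sorted_eq_filters (l : List (Int × String)) :
    PySem.List.sorted l pvClassKey false =
    l.filter (fun d => pvClassKey d == 0) ++
    l.filter (fun d => pvClassKey d == 1) ++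
    l.filter (fun d => pvClassKey d == 2) := by
  have h := foldl_insert_filters l [] [] [] (by simp) (by simp) (by simp)
  simpa [PySem.List.sorted] using h

-- A's foldl over the dict, with arbitrary initial bucket contents
theorem foldl_buckets (l : List (Int × String)) : ∀ (a b c : List (Int × String)),
    (l.foldl
      (fun (set_per_class : PySem.Dict String (List (Int × String))) d =>
        if d.1 == 0 then set_per_class.modify "0" [] (· ++ [d])
        else if d.1 == 1 then set_per_class.modify "1" [] (· ++ [d])
        else set_per_class.modify "2" [] (· ++ [d]))
      (PySem.Dict.mk [("0", a), ("1", b), ("2", c)])).items =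
    [("0", a ++ l.filter (fun d => pvClassKey d == 0)),
     ("1", b ++ l.filter (fun d => pvClassKey d == 1)),
     ("2", c ++ l.filter (fun d => pvClassKey d == 2))] := by
  induction l with
  | nil => intro a b c; simp
  | cons d t ih =>
    intro a b c
    by_cases h0 : d.1 = 0
    · simpa [List.foldl_cons, h0, pvClassKey, PySem.Dict.modify, PySem.Dict.get?, PySem.Dict.insert,
        List.filter_cons] using ih (a ++ [d]) b c
    · by_cases h1 : d.1 = 1
      · simpa [List.foldl_cons, h0, h1, pvClassKey, PySem.Dict.modify, PySem.Dict.get?, PySem.Dict.insert,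
          List.filter_cons] using ih a (b ++ [d]) c
      · simpa [List.foldl_cons, h0, h1, pvClassKey, PySem.Dict.modify, PySem.Dict.get?, PySem.Dict.insert,
          List.filter_cons] using ih a b (c ++ [d])

theorem countP_eq_len₀ (l : List (Int × String)) :
    l.countP (fun d => d.1 == 0) = (l.filter (fun d => pvClassKey d == 0)).length := by
  rw [← List.countP_eq_length_filter]
  apply List.countP_congr
  intro d _; unfold pvClassKey; split_ifs with h <;> simp_all

theorem countP_eq_len₁ (l : List (Int × String)) :
    l.countP (fun d => d.1 == 1) = (l.filter (fun d => pvClassKey d == 1)).length := by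
  rw [← List.countP_eq_length_filter]
  apply List.countP_congr
  intro d _; unfold pvClassKey; split_ifs with h h' <;> simp_all

-- ===== VERDICT (by name: the statement is the Claim_ definition above) =====
theorem get_data_per_class_spec : Claim_equal_get_data_per_class := by
  intro ts _
  unfold Spec_get_data_per_class get_data_per_class get_data_per_class_alt
  have hA := foldl_buckets ts [] [] []
  simp only [List.nil_append] at hA
  rw [show (PySem.Dict.mk [("0", ([] : List (Int × String))), ("1", []), ("2", [])]) =
      PySem.Dict.ofList [("0", []), ("1", []), ("2", [])] from rfl] at hA
  rw [hA]
  dsimp only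
  rw [sorted_eq_filters ts, countP_eq_len₀ ts, countP_eq_len₁ ts]
  set f0 := ts.filter (fun d => pvClassKey d == 0)
  set f1 := ts.filter (fun d => pvClassKey d == 1)
  set f2 := ts.filter (fun d => pvClassKey d == 2)
  have h01 : ((f0.length : Int) + (f1.length : Int)) = ((f0.length + f1.length : Nat) : Int) := by
    push_cast; ring
  rw [h01, PySem.List.slice_to _ (by positivity), PySem.List.slice_natCast,
      PySem.List.slice_from _ (by positivity)]
  have hc : ((f0.length : Int) + (f1.length : Int)).toNat = f0.length + f1.length := by omega
  simp [f0, f1, f2, hc, Int.toNat_natCast,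
    List.drop_append]
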